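-- pv_equiv track=rewrite | github.com/Deksoer22/psychic-broccoli | reto-semana11/m_retosemanal.py | eliminar_elementos_repetidos
-- ===== SOURCE A (Python) =====
-- def eliminar_elementos_repetidos(listas):
--     """
--     función para eliminar de cada lista los elementos que están en las otras listas.
--     """
--
--     listas_filtradas = []
--     for i in range(len(listas)):
--         lista_actual = listas[i]
--         elementos_para_eliminar =[]
--         for j in range(i + 1, len(listas)):
--             elementos_para_eliminar.extend(listas[j])
--             elementos_para_eliminar = [elemento.lower() for elemento in elementos_para_eliminar]
--
--         nueva_lista = [elemento for elemento in lista_actual if elemento.lower() not in elementos_para_eliminar]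
--         listas_filtradas.append(nueva_lista)
--     return listas_filtradas
-- ===== SOURCE B (Python) =====
-- def eliminar_elementos_repetidos(listas):
--     """
--     función para eliminar de cada lista los elementos que están en las otras listas.
--     (Single backward pass keeping a suffix set of lowercased elements.)
--     """
--     resultado = []
--     vistos = set()
--     for lista in reversed(listas):
--         resultado.append([e for e in lista if e.lower() not in vistos])
--         vistos.update(e.lower() for e in lista)
--     resultado.reverse()
--     return resultado
-- ===== Notes on version B (the rewrite author's own statement) =====
-- stated objective: faster
-- what changed: Replaces the nested index loops (rebuilding and re-lowercasing a removal list for every i, with linear list membership) by one backward pass that maintains a set of lowercased elements of later lists, with O(1) membership.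
import Mathlib
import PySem

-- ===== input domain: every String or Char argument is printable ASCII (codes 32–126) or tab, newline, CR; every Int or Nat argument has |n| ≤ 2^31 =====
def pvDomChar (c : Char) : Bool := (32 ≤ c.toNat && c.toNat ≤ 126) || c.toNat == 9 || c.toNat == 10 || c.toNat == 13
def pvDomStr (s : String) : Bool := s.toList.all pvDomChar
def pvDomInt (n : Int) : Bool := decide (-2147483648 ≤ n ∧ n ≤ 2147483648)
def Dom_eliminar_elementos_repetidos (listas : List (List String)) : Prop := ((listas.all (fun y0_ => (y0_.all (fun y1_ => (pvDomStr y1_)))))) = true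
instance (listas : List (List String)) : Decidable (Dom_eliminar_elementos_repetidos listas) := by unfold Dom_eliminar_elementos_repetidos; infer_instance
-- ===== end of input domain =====

-- B replaces A's nested index loops by one backward pass over the lists that
-- maintains a set of the lowercased elements seen in later lists (objective: faster).

-- ===== PORT A =====
def eliminar_elementos_repetidos (listas : List (List String)) : List (List String) :=
  (PySem.List.pyRange 0 (listas.length : Int) 1).foldl
    (fun listas_filtradas i =>
      let lista_actual := PySem.List.pyGetD listas i []
      let elementos_para_eliminar :=
        (PySem.List.pyRange (i + 1) (listas.length : Int) 1).foldl
          (fun acc j => (acc ++ PySem.List.pyGetD listas j []).map (fun e => PySem.Str.lower e)) []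
      let nueva_lista :=
        lista_actual.filter (fun e => !(elementos_para_eliminar.contains (PySem.Str.lower e)))
      listas_filtradas ++ [nueva_lista]) []

-- ===== PORT B =====
def eliminar_elementos_repetidos_alt (listas : List (List String)) : List (List String) :=
  let p := listas.reverse.foldl
    (fun (p : List (List String) × PySem.Set String) lista =>
      (p.1 ++ [lista.filter (fun e => !(PySem.Set.contains p.2 (PySem.Str.lower e)))],
       PySem.Set.update p.2 (lista.map (fun e => PySem.Str.lower e))))
    ([], PySem.Set.empty)
  p.1.reverse

-- ===== PRECONDITION & SPEC =====
def Spec_eliminar_elementos_repetidos (listas : List (List String)) (out : List (List String)) : Prop := out = eliminar_elementos_repetidos_alt listas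
instance (listas : List (List String)) (out : List (List String)) : Decidable (Spec_eliminar_elementos_repetidos listas out) := by unfold Spec_eliminar_elementos_repetidos; infer_instance

-- ===== CLAIM (what is proved, stated in full; the proofs are below) =====
def Claim_equal_eliminar_elementos_repetidos : Prop := ∀ (listas : List (List String)), Dom_eliminar_elementos_repetidos listas → Spec_eliminar_elementos_repetidos listas (eliminar_elementos_repetidos listas)

-- ===== LEMMAS AND PROOFS =====

-- the common specification: keep an element iff its lowercase is not among the
-- lowercased elements of the later lists
def pvF : List (List String) → List (List String)
  | [] => []
  | l :: ls =>
      l.filter (fun e => !((ls.flatten.map PySem.Str.lower).contains (PySem.Str.lower e))) :: pvF ls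

theorem pv_charOfNat_toNat (n : Nat) (h : n.isValidChar) : (Char.ofNat n).toNat = n := by
  unfold Char.ofNat; rw [dif_pos h]; rfl

theorem pv_lowerChar_idem (c : Char) :
    PySem.Chars.lowerChar (PySem.Chars.lowerChar c) = PySem.Chars.lowerChar c := by
  simp only [PySem.Chars.lowerChar, PySem.Chars.isupper]
  split_ifs with h1 h2
  · simp only [Bool.and_eq_true, decide_eq_true_eq, Char.le_def] at h1 h2
    have hA : c.toNat ≤ 90 := h1.2
    have hB : 65 ≤ c.toNat := h1.1
    have hv : (c.toNat + 32).isValidChar := by left; omega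
    have ht : (Char.ofNat (c.toNat + 32)).toNat = c.toNat + 32 := pv_charOfNat_toNat _ hv
    have h22 : (Char.ofNat (c.toNat + 32)).toNat ≤ 90 := h2.2
    omega
  · rfl
  · rfl

theorem pv_lower_idem (s : String) :
    PySem.Str.lower (PySem.Str.lower s) = PySem.Str.lower s := by
  simp only [PySem.Str.lower, PySem.Chars.lower, String.toList_ofList]
  congr 1
  rw [List.map_map]
  exact List.map_congr_left (fun c _ => pv_lowerChar_idem c)

theorem pv_map_lower_lower (l : List String) :
    (l.map PySem.Str.lower).map PySem.Str.lower = l.map PySem.Str.lower := by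
  simp [List.map_map, Function.comp, pv_lower_idem]

-- the inner loop of A computes the lowercased concatenation
theorem pv_innerA (ls : List (List String)) (acc : List String) :
    ls.foldl (fun acc l => (acc ++ l).map PySem.Str.lower) (acc.map PySem.Str.lower)
      = (acc ++ ls.flatten).map PySem.Str.lower := by
  induction ls generalizing acc with
  | nil => simp
  | cons l ls ih =>
    simp only [List.foldl_cons, List.flatten_cons]
    have h1 : (acc.map PySem.Str.lower ++ l).map PySem.Str.lower
        = (acc ++ l).map PySem.Str.lower := by
      rw [List.map_append, List.map_append, pv_map_lower_lower]
    rw [h1, ih (acc ++ l)]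
    simp [List.append_assoc]

-- A's body at index i, closed form
def pvAux (xs : List (List String)) (i : Int) : List String :=
  (PySem.List.pyGetD xs i []).filter
    (fun e => !((((xs.drop (i + 1).toNat).flatten.map PySem.Str.lower).contains (PySem.Str.lower e))))

theorem pv_map_aux (xs : List (List String)) :
    (PySem.List.pyRange 0 (xs.length : Int) 1).map (pvAux xs) = pvF xs := by
  induction xs with
  | nil => simp [PySem.List.pyRange_one_eq_nil, pvF]
  | cons l ls ih =>
    have hlen : ((l :: ls).length : Int) = (ls.length : Int) + 1 := by
      push_cast [List.length_cons]; ring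
    rw [hlen, PySem.List.pyRange_one_cons (by positivity)]
    simp only [List.map_cons, zero_add]
    have hhead : pvAux (l :: ls) 0 = l.filter
        (fun e => !((ls.flatten.map PySem.Str.lower).contains (PySem.Str.lower e))) := by
      simp [pvAux, PySem.List.pyGetD]
    have htail : (PySem.List.pyRange 1 ((ls.length : Int) + 1) 1).map (pvAux (l :: ls))
        = (PySem.List.pyRange 0 (ls.length : Int) 1).map (pvAux ls) := by
      rw [PySem.List.pyRange_one 1 ((ls.length : Int) + 1),
          PySem.List.pyRange_one 0 (ls.length : Int)]
      have hn : (((ls.length : Int) + 1 - 1)).toNat = ls.length := by omega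
      have hn0 : ((ls.length : Int) - 0).toNat = ls.length := by omega
      rw [hn, hn0, List.map_map, List.map_map]
      apply List.map_congr_left
      intro k _
      show pvAux (l :: ls) (1 + (k : Int)) = pvAux ls (0 + (k : Int))
      have e1 : (1 : Int) + (k : Int) = ((k + 1 : Nat) : Int) := by push_cast; ring
      have e2 : (0 : Int) + (k : Int) = ((k : Nat) : Int) := by ring
      rw [e1, e2]
      unfold pvAux
      rw [PySem.List.pyGetD_natCast, PySem.List.pyGetD_natCast]
      have e3 : (((k + 1 : Nat) : Int) + 1).toNat = k + 2 := by omega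
      have e4 : (((k : Nat) : Int) + 1).toNat = k + 1 := by omega
      rw [e3, e4]
      rfl
    rw [hhead, htail, ih]
    rfl

-- A equals pvF
theorem pv_A_eq_F (xs : List (List String)) : eliminar_elementos_repetidos xs = pvF xs := by
  unfold eliminar_elementos_repetidos
  have hcongr : (PySem.List.pyRange 0 (xs.length : Int) 1).foldl
      (fun listas_filtradas i =>
        listas_filtradas ++
          [(PySem.List.pyGetD xs i []).filter
            (fun e => !(((PySem.List.pyRange (i + 1) (xs.length : Int) 1).foldl
              (fun acc j => (acc ++ PySem.List.pyGetD xs j []).map (fun e => PySem.Str.lower e)) []).contains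
                (PySem.Str.lower e)))]) []
      = (PySem.List.pyRange 0 (xs.length : Int) 1).foldl
          (fun listas_filtradas i => listas_filtradas ++ [pvAux xs i]) [] := by
    apply PySem.List.foldl_congr_mem
    intro acc i hi
    have hi0 : (0 : Int) ≤ i := (PySem.List.mem_pyRange_one.mp hi).1
    have hinner : (PySem.List.pyRange (i + 1) (xs.length : Int) 1).foldl
        (fun acc j => (acc ++ PySem.List.pyGetD xs j []).map (fun e => PySem.Str.lower e)) []
        = (xs.drop (i + 1).toNat).flatten.map PySem.Str.lower := by
      have := PySem.List.foldl_pyRange_pyGetD' (xs := xs) (a := i + 1) (d := ([] : List String))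
        (f := fun acc l => (acc ++ l).map PySem.Str.lower) (init := ([] : List String)) (by omega)
      rw [this]
      have := pv_innerA (xs.drop (i + 1).toNat) []
      simpa using this
    simp only [hinner]
    rfl
  rw [hcongr, PySem.List.foldl_append_singleton_eq_map, List.nil_append, pv_map_aux]

-- B's loop as structural recursion over the lists
def pvBrec : List (List String) → PySem.Set String → List (List String) × PySem.Set String
  | [], s => ([], s)
  | l :: ls, s =>
      let r := pvBrec ls s
      (r.1 ++ [l.filter (fun e => !(PySem.Set.contains r.2 (PySem.Str.lower e)))],
       PySem.Set.update r.2 (l.map (fun e => PySem.Str.lower e)))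

theorem pv_loop_eq (ls : List (List String)) (res : List (List String)) (s : PySem.Set String) :
    ls.reverse.foldl
      (fun (p : List (List String) × PySem.Set String) lista =>
        (p.1 ++ [lista.filter (fun e => !(PySem.Set.contains p.2 (PySem.Str.lower e)))],
         PySem.Set.update p.2 (lista.map (fun e => PySem.Str.lower e))))
      (res, s)
      = (res ++ (pvBrec ls s).1, (pvBrec ls s).2) := by
  induction ls generalizing res with
  | nil => simp [pvBrec]
  | cons l ls ih =>
    simp only [List.reverse_cons, List.foldl_append, ih, List.foldl_cons, List.foldl_nil, pvBrec]
    simp [List.append_assoc]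

theorem pv_mem_Brec_seen (ls : List (List String)) (s : PySem.Set String) (x : String) :
    x ∈ (pvBrec ls s).2 ↔ x ∈ s ∨ x ∈ ls.flatten.map PySem.Str.lower := by
  induction ls with
  | nil => simp [pvBrec]
  | cons l ls ih =>
    simp only [pvBrec, PySem.Set.mem_update, ih, List.flatten_cons, List.map_append,
      List.mem_append]
    tauto

theorem pv_Brec_eq_F (ls : List (List String)) :
    ((pvBrec ls PySem.Set.empty).1).reverse = pvF ls := by
  induction ls with
  | nil => simp [pvBrec, pvF]
  | cons l ls ih =>
    simp only [pvBrec, List.reverse_append, List.reverse_cons, List.reverse_nil,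
      List.nil_append, List.cons_append, pvF, ih]
    congr 1
    apply List.filter_congr
    intro e _
    congr 1
    have h1 : PySem.Set.contains (pvBrec ls PySem.Set.empty).2 (PySem.Str.lower e)
        = decide (PySem.Str.lower e ∈ (pvBrec ls PySem.Set.empty).2) := by
      simp [PySem.Set.contains]
    have h2 : (ls.flatten.map PySem.Str.lower).contains (PySem.Str.lower e)
        = decide (PySem.Str.lower e ∈ ls.flatten.map PySem.Str.lower) := by
      simp
    rw [h1, h2]
    congr 1
    have := pv_mem_Brec_seen ls PySem.Set.empty (PySem.Str.lower e)
    simp [PySem.Set.empty] at this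
    simp [this]

theorem pv_B_eq_F (xs : List (List String)) : eliminar_elementos_repetidos_alt xs = pvF xs := by
  unfold eliminar_elementos_repetidos_alt
  rw [pv_loop_eq xs [] PySem.Set.empty]
  simpa using pv_Brec_eq_F xs

-- ===== VERDICT (by name: the statement is the Claim_ definition above) =====
theorem eliminar_elementos_repetidos_spec : Claim_equal_eliminar_elementos_repetidos := by
  intro listas _
  unfold Spec_eliminar_elementos_repetidos
  rw [pv_A_eq_F, pv_B_eq_F]
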